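-- pv_equiv track=rewrite | github.com/ClaudiaHeYun/Novel-coronavirus | analysis.py | process_y
-- ===== SOURCE A (Python) =====
-- def process_y(case_data):
-- 	# there's definitely a better way to do this
-- 	y = []
-- 	"""
-- 	y = {
-- 		country :: String,
-- 		date :: String,
-- 		days until/since (positive/negative) first case :: Integer
-- 	}
-- 	"""
-- 	# days since infection; negative
-- 	prev_country = case_data[0][0]
-- 	days = 0
-- 	for row in case_data:
-- 		if (prev_country != row[0]):
-- 			prev_country = row[0]
-- 			days = 0
-- 		if row[2] > 0:
-- 			days -= 1
-- 		new_row = [row[0], row[1], days]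
-- 		y.append(new_row)
--
-- 	# days until infection; positive
-- 	prev_country = y[-1][0]
-- 	days = 0
-- 	i = len(y) - 1
-- 	while i >= 0:
-- 		if (prev_country != y[i][0]):
-- 			prev_country = y[i][0]
-- 			days = 0
-- 		if y[i][2] > -1:
-- 			y[i][2] = days
-- 			days += 1
-- 		i -= 1
-- 	return y
-- ===== SOURCE B (Python) =====
-- def process_y(case_data):
--     # Group into consecutive per-country runs; two local passes per group.
--     out = []
--     i, n = 0, len(case_data)
--     while i < n:
--         country = case_data[i][0]
--         j = i
--         while j < n and case_data[j][0] == country: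
--             j += 1
--         group = case_data[i:j]
--         # forward pass: days since infection (non-positive)
--         vals = []
--         days = 0
--         for row in group:
--             if row[2] > 0:
--                 days -= 1
--             vals.append(days)
--         # reverse pass: countdown to infection for rows still at 0
--         days = 0
--         for k in range(len(vals) - 1, -1, -1):
--             if vals[k] == 0:
--                 vals[k] = days
--                 days += 1
--         out.extend([row[0], row[1], v] for row, v in zip(group, vals))
--         i = j
--     return out
-- ===== Notes on version B (the rewrite author's own statement) =====
-- stated objective: simpler
-- what changed: B splits the data into consecutive per-country runs once and processes each run independently with a local forward pass (negative days) and a local reverse pass (positive countdown), instead of A's two global stateful sweeps over the whole list with prev_country reset logic; B also returns [] on empty input where A raises.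
-- outside the precondition, e.g. on process_y([]): A raises IndexError, B returns []
import Mathlib
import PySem

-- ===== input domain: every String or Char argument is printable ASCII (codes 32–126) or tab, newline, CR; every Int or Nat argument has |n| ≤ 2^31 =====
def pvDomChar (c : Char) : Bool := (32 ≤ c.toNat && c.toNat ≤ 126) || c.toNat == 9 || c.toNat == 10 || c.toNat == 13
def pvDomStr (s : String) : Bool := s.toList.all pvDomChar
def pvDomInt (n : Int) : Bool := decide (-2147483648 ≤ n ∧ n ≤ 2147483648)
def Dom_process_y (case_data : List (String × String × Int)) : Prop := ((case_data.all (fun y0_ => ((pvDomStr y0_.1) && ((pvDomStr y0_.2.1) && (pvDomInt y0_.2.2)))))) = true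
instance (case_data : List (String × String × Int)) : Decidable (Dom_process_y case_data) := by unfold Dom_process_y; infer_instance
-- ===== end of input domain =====

-- B groups the data into consecutive per-country runs and processes each run with two
-- local passes, instead of A's two global stateful sweeps; return values agree on all
-- non-empty inputs (objective: simpler per-group decomposition; not faster).

-- ===== PORT A =====
-- first for-loop of A: state (prev_country, days), appends (row0, row1, days)
def pass1A (prev : String) (days : Int) : List (String × String × Int) → List (String × String × Int)
  | [] => []
  | r :: rest =>
    let prev1 := if prev ≠ r.1 then r.1 else prev
    let days1 := if prev ≠ r.1 then 0 else days
    let days2 := if r.2.2 > 0 then days1 - 1 else days1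
    (r.1, r.2.1, days2) :: pass1A prev1 days2 rest

-- second (backward while-) loop of A, transcribed as a walk over y.reverse
def pass2A (prev : String) (days : Int) : List (String × String × Int) → List (String × String × Int)
  | [] => []
  | r :: rest =>
    let prev1 := if prev ≠ r.1 then r.1 else prev
    let days1 := if prev ≠ r.1 then 0 else days
    if r.2.2 > -1 then
      (r.1, r.2.1, days1) :: pass2A prev1 (days1 + 1) rest
    else
      r :: pass2A prev1 days1 rest

def process_y (case_data : List (String × String × Int)) : List (String × String × Int) :=
  match case_data with
  | [] => []   -- Python A raises IndexError here (case_data[0][0]); excluded by Pre_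
  | r0 :: _ =>
    let y := pass1A r0.1 0 case_data
    match y.reverse with
    | [] => []   -- unreachable: y is nonempty
    | rl :: _ => (pass2A rl.1 0 y.reverse).reverse

-- ===== PORT B =====
-- forward pass inside a group: the list of 'days since infection' values
def fwdVals (days : Int) : List (String × String × Int) → List Int
  | [] => []
  | r :: rest =>
    let d := if r.2.2 > 0 then days - 1 else days
    d :: fwdVals d rest

-- reverse pass inside a group, written over the reversed value list
def backFillRev (days : Int) : List Int → List Int
  | [] => []
  | v :: rest =>
    if v == 0 then days :: backFillRev (days + 1) rest
    else v :: backFillRev days rest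

def procGroup (g : List (String × String × Int)) : List (String × String × Int) :=
  let vals := fwdVals 0 g
  let vals' := (backFillRev 0 vals.reverse).reverse
  (g.zip vals').map (fun rv => (rv.1.1, rv.1.2.1, rv.2))

def process_y_alt : List (String × String × Int) → List (String × String × Int)
  | [] => []
  | r :: rest =>
    procGroup (r :: rest.takeWhile (fun s => s.1 == r.1))
      ++ process_y_alt (rest.dropWhile (fun s => s.1 == r.1))
termination_by l => l.length
decreasing_by
  simp only [List.length_cons]
  exact Nat.lt_succ_of_le (List.length_dropWhile_le _ _)

-- ===== PRECONDITION & SPEC =====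
-- Pre_ excludes only the empty list, on which Python A raises IndexError.
def Pre_process_y (case_data : List (String × String × Int)) : Prop := case_data ≠ []
instance (case_data : List (String × String × Int)) : Decidable (Pre_process_y case_data) := by unfold Pre_process_y; infer_instance
def pvWitness_process_y : (List (String × String × Int)) := [("China", "1/22/20", 0), ("China", "1/23/20", 5), ("US", "1/22/20", 1)]

def Spec_process_y (case_data : List (String × String × Int)) (out : List (String × String × Int)) : Prop := out = process_y_alt case_data
instance (case_data : List (String × String × Int)) (out : List (String × String × Int)) : Decidable (Spec_process_y case_data out) := by unfold Spec_process_y; infer_instance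

-- ===== CLAIM (what is proved, stated in full; the proofs are below) =====
def Claim_equal_process_y : Prop := ∀ (case_data : List (String × String × Int)), Dom_process_y case_data → Pre_process_y case_data → Spec_process_y case_data (process_y case_data)

-- ===== LEMMAS AND PROOFS =====

-- (g.zip v).map with the output-row constructor; the shape both sides reduce to
def zmap (g : List (String × String × Int)) (v : List Int) : List (String × String × Int) :=
  (g.zip v).map (fun rv => (rv.1.1, rv.1.2.1, rv.2))

-- final prev_country after a walk over l starting from p
def lastC (p : String) : List (String × String × Int) → String
  | [] => p
  | r :: l => lastC r.1 l

-- the days value after one step of A's first loop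
def pstep (p : String) (d : Int) (r : String × String × Int) : Int :=
  if r.2.2 > 0 then (if p ≠ r.1 then 0 else d) - 1 else (if p ≠ r.1 then 0 else d)

-- the days value after the reset of A's second loop
def qstep (p : String) (d : Int) (r : String × String × Int) : Int :=
  if p ≠ r.1 then 0 else d

theorem pass1A_cons (p : String) (d : Int) (r : String × String × Int)
    (l : List (String × String × Int)) :
    pass1A p d (r :: l) = (r.1, r.2.1, pstep p d r) :: pass1A r.1 (pstep p d r) l := by
  by_cases hp : p ≠ r.1
  · simp [pass1A, pstep, hp]
  · simp only [ne_eq, not_not] at hp; subst hp; simp [pass1A, pstep]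

theorem pass2A_cons (p : String) (d : Int) (r : String × String × Int)
    (l : List (String × String × Int)) :
    pass2A p d (r :: l) =
      if r.2.2 > -1 then (r.1, r.2.1, qstep p d r) :: pass2A r.1 (qstep p d r + 1) l
      else r :: pass2A r.1 (qstep p d r) l := by
  by_cases hp : p ≠ r.1
  · simp [pass2A, qstep, hp]
  · simp only [ne_eq, not_not] at hp; subst hp; simp [pass2A, qstep]

theorem lastC_append_single (l : List (String × String × Int)) (x : String × String × Int) :
    ∀ p, lastC p (l ++ [x]) = x.1 := by
  induction l with
  | nil => intro p; simp [lastC]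
  | cons r t ih => intro p; simpa [lastC] using ih r.1

theorem zmap_cons (r : String × String × Int) (g : List (String × String × Int)) (v : Int) (vs : List Int) :
    zmap (r :: g) (v :: vs) = (r.1, r.2.1, v) :: zmap g vs := by
  simp [zmap]

theorem zmap_reverse (g : List (String × String × Int)) (v : List Int) (h : g.length = v.length) :
    (zmap g v).reverse = zmap g.reverse v.reverse := by
  induction g generalizing v with
  | nil => cases v with | nil => simp [zmap] | cons a b => simp at h
  | cons r t ih =>
    cases v with
    | nil => simp at h
    | cons a b =>
      simp only [List.length_cons, Nat.add_right_cancel_iff] at h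
      rw [zmap_cons]
      simp only [List.reverse_cons]
      rw [ih b h]
      have hlen : t.reverse.length = b.reverse.length := by simp [h]
      simp [zmap, List.zip_append hlen]

theorem fwdVals_length (d : Int) (g : List (String × String × Int)) :
    (fwdVals d g).length = g.length := by
  induction g generalizing d with
  | nil => simp [fwdVals]
  | cons r t ih => simp [fwdVals, ih]

theorem backFillRev_length (d : Int) (v : List Int) :
    (backFillRev d v).length = v.length := by
  induction v generalizing d with
  | nil => simp [backFillRev]
  | cons a b ih => simp only [backFillRev]; split <;> simp [ih]

theorem fwdVals_nonpos (g : List (String × String × Int)) :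
    ∀ d, d ≤ 0 → ∀ v ∈ fwdVals d g, v ≤ 0 := by
  induction g with
  | nil => intro d _ v hv; simp [fwdVals] at hv
  | cons r t ih =>
    intro d hd v hv
    simp only [fwdVals, List.mem_cons] at hv
    rcases hv with h | h
    · subst h; split <;> omega
    · exact ih _ (by split <;> omega) v h

-- a country change resets prev/days, making them irrelevant
theorem pass1A_reset (p : String) (d : Int) (r : String × String × Int)
    (l : List (String × String × Int)) (h : r.1 ≠ p) :
    pass1A p d (r :: l) = pass1A r.1 0 (r :: l) := by
  rw [pass1A_cons, pass1A_cons]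
  have : pstep p d r = pstep r.1 0 r := by simp [pstep, h.symm]
  rw [this]

theorem pass2A_reset (p : String) (d : Int) (r : String × String × Int)
    (l : List (String × String × Int)) (h : r.1 ≠ p) :
    pass2A p d (r :: l) = pass2A r.1 0 (r :: l) := by
  rw [pass2A_cons, pass2A_cons]
  have : qstep p d r = qstep r.1 0 r := by simp [qstep, h.symm]
  rw [this]

-- pass1A splits across a same-country prefix, for some carried days value
theorem pass1A_append (g rest : List (String × String × Int)) (c : String)
    (hg : ∀ x ∈ g, x.1 = c) :
    ∀ d, ∃ d', pass1A c d (g ++ rest) = pass1A c d g ++ pass1A c d' rest := by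
  induction g with
  | nil => intro d; exact ⟨d, by simp [pass1A]⟩
  | cons r t ih =>
    intro d
    have hr : r.1 = c := hg r (by simp)
    obtain ⟨d', hd'⟩ := ih (fun x hx => hg x (by simp [hx])) (pstep c d r)
    exact ⟨d', by rw [List.cons_append, pass1A_cons, pass1A_cons, hr, hd', List.cons_append]⟩

-- pass2A splits anywhere, carrying the final prev_country of the prefix
theorem pass2A_append (l1 l2 : List (String × String × Int)) :
    ∀ p d, ∃ d', pass2A p d (l1 ++ l2) = pass2A p d l1 ++ pass2A (lastC p l1) d' l2 := by
  induction l1 with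
  | nil => intro p d; exact ⟨d, by simp [pass2A, lastC]⟩
  | cons r t ih =>
    intro p d
    by_cases hv : r.2.2 > -1
    · obtain ⟨d', hd'⟩ := ih r.1 (qstep p d r + 1)
      exact ⟨d', by rw [List.cons_append, pass2A_cons, pass2A_cons, if_pos hv, if_pos hv, hd',
        List.cons_append]; rfl⟩
    · obtain ⟨d', hd'⟩ := ih r.1 (qstep p d r)
      exact ⟨d', by rw [List.cons_append, pass2A_cons, pass2A_cons, if_neg hv, if_neg hv, hd',
        List.cons_append]; rfl⟩

-- within one group the forward sweep is exactly (rows zipped with fwdVals)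
theorem pass1A_group (g : List (String × String × Int)) (c : String)
    (hg : ∀ x ∈ g, x.1 = c) : ∀ d, pass1A c d g = zmap g (fwdVals d g) := by
  induction g with
  | nil => intro d; simp [pass1A, zmap, fwdVals]
  | cons r t ih =>
    intro d
    have hr : r.1 = c := hg r (by simp)
    have hstep : pstep c d r = (if r.2.2 > 0 then d - 1 else d) := by
      simp [pstep, hr]
    rw [pass1A_cons, hstep,
      show fwdVals d (r :: t)
          = (if r.2.2 > 0 then d - 1 else d) :: fwdVals (if r.2.2 > 0 then d - 1 else d) t from rfl,
      zmap_cons, hr, ih (fun x hx => hg x (by simp [hx]))]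

-- within one group the backward sweep is exactly backFillRev on the value list
theorem pass2A_group (g : List (String × String × Int)) (v : List Int) (c : String)
    (hg : ∀ x ∈ g, x.1 = c) (hv : ∀ x ∈ v, x ≤ 0) (hl : g.length = v.length) :
    ∀ d, pass2A c d (zmap g v) = zmap g (backFillRev d v) := by
  induction g generalizing v with
  | nil =>
    intro d
    cases v with
    | nil => simp [zmap, pass2A, backFillRev]
    | cons a b => simp at hl
  | cons r t ih =>
    intro d
    cases v with
    | nil => simp at hl
    | cons a b =>
      simp only [List.length_cons, Nat.add_right_cancel_iff] at hl
      have hr : r.1 = c := hg r (by simp)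
      have ha : a ≤ 0 := hv a (by simp)
      have hq : qstep c d (r.1, r.2.1, a) = d := by simp [qstep, hr]
      have ihx : ∀ d', pass2A r.1 d' (zmap t b) = zmap t (backFillRev d' b) := by
        rw [hr]; exact ih b (fun x hx => hg x (by simp [hx])) (fun x hx => hv x (by simp [hx])) hl
      rw [zmap_cons, pass2A_cons, hq]
      by_cases h0 : a = 0
      · subst h0
        rw [if_pos (by norm_num),
          show backFillRev d (0 :: b) = d :: backFillRev (d + 1) b from by simp [backFillRev],
          zmap_cons, ihx]
      · rw [if_neg (by simp; omega),
          show backFillRev d (a :: b) = a :: backFillRev d b from by simp [backFillRev, h0],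
          zmap_cons, ihx]

theorem pass1A_country (g : List (String × String × Int)) (c : String)
    (hg : ∀ x ∈ g, x.1 = c) : ∀ p d, ∀ y ∈ pass1A p d g, y.1 = c := by
  induction g with
  | nil => intro p d y hy; simp [pass1A] at hy
  | cons r t ih =>
    intro p d y hy
    rw [pass1A_cons] at hy
    rcases List.mem_cons.mp hy with h | h
    · subst h; exact hg r (by simp)
    · exact ih (fun x hx => hg x (by simp [hx])) _ _ y h

-- the whole of A restricted to one same-country group equals B's procGroup
theorem group_lemma (g : List (String × String × Int)) (c : String)
    (hg : ∀ x ∈ g, x.1 = c) :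
    (pass2A c 0 (pass1A c 0 g).reverse).reverse = procGroup g := by
  rw [pass1A_group g c hg 0]
  have hlen : g.length = (fwdVals 0 g).length := (fwdVals_length 0 g).symm
  rw [zmap_reverse g _ hlen]
  rw [pass2A_group g.reverse (fwdVals 0 g).reverse c
    (fun x hx => hg x (List.mem_reverse.mp hx))
    (fun x hx => fwdVals_nonpos g 0 le_rfl x (List.mem_reverse.mp hx))
    (by simp [hlen]) 0]
  rw [show zmap g.reverse (backFillRev 0 (fwdVals 0 g).reverse)
        = (zmap g ((backFillRev 0 (fwdVals 0 g).reverse).reverse)).reverse by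
      rw [zmap_reverse g _ (by simp [backFillRev_length, fwdVals_length]), List.reverse_reverse]]
  rw [List.reverse_reverse]
  simp [procGroup, zmap]

theorem dropWhile_head_false {α : Type} (p : α → Bool) (l : List α) (x : α) (xs : List α)
    (h : l.dropWhile p = x :: xs) : p x = false := by
  induction l with
  | nil => simp [List.dropWhile] at h
  | cons a t ih =>
    by_cases hp : p a = true
    · exact ih (by simpa [List.dropWhile, hp] using h)
    · rw [List.dropWhile_cons_of_neg hp] at h
      cases h; simpa using hp

theorem key_equiv : ∀ (cd : List (String × String × Int)), process_y cd = process_y_alt cd := by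
  intro cd
  induction hn : cd.length using Nat.strong_induction_on generalizing cd with
  | _ n ih =>
  cases cd with
  | nil => simp [process_y, process_y_alt]
  | cons r rest =>
    have hsplit : rest = rest.takeWhile (fun s => s.1 == r.1) ++ rest.dropWhile (fun s => s.1 == r.1) :=
      (List.takeWhile_append_dropWhile).symm
    set g1 := rest.takeWhile (fun s => s.1 == r.1) with hg1
    set rest' := rest.dropWhile (fun s => s.1 == r.1) with hrest'
    have hgc : ∀ x ∈ (r :: g1), x.1 = r.1 := by
      intro x hx
      rcases List.mem_cons.mp hx with h | h
      · rw [h]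
      · rw [hg1] at h
        have := List.mem_takeWhile_imp (p := fun s : String × String × Int => s.1 == r.1) h
        exact beq_iff_eq.mp this
    have haltdef : process_y_alt (r :: rest) = procGroup (r :: g1) ++ process_y_alt rest' := by
      rw [process_y_alt]
    obtain ⟨d1, hd1⟩ := pass1A_append (r :: g1) rest' r.1 hgc 0
    have hAy : pass1A r.1 0 (r :: rest) = pass1A r.1 0 (r :: g1) ++ pass1A r.1 d1 rest' := by
      rw [show (r :: rest) = (r :: g1) ++ rest' by rw [List.cons_append, ← hsplit]] at *
      exact hd1
    set A1g := pass1A r.1 0 (r :: g1) with hA1g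
    have hA1g_ne : A1g ≠ [] := by rw [hA1g, pass1A_cons]; simp
    have hA1g_c : ∀ y ∈ A1g, y.1 = r.1 := fun y hy => pass1A_country (r :: g1) r.1 hgc r.1 0 y (hA1g ▸ hy)
    have hArev_ne : A1g.reverse ≠ [] := by simpa [List.reverse_eq_nil_iff] using hA1g_ne
    cases hrest0 : rest' with
    | nil =>
      -- single group: the whole input is one country run
      have hy : pass1A r.1 0 (r :: rest) = A1g := by
        rw [hAy, hrest0]; simp [pass1A]
      have hgl : (pass2A r.1 0 A1g.reverse).reverse = procGroup (r :: g1) := by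
        rw [hA1g]; exact group_lemma _ _ hgc
      cases har : A1g.reverse with
      | nil => exact absurd har hArev_ne
      | cons z w =>
        have hz : z.1 = r.1 := hA1g_c z (List.mem_reverse.mp (har ▸ List.mem_cons_self ..))
        have hAcomp : process_y (r :: rest) = (pass2A z.1 0 (z :: w)).reverse := by
          show (match (pass1A r.1 0 (r :: rest)).reverse with
                | [] => ([] : List (String × String × Int))
                | rl :: _ => (pass2A rl.1 0 (pass1A r.1 0 (r :: rest)).reverse).reverse) = _
          rw [hy, har]
        rw [hAcomp, hz, ← har, hgl, haltdef, hrest0]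
        simp [process_y_alt]
    | cons s t =>
      have hs : s.1 ≠ r.1 := by
        have := dropWhile_head_false (fun x => x.1 == r.1) rest s t (hrest'.symm.trans hrest0)
        simpa using this
      have hYr : pass1A r.1 d1 rest' = pass1A s.1 0 rest' := by
        rw [hrest0]; exact pass1A_reset r.1 d1 s t hs
      set Yr := pass1A s.1 0 rest' with hYrdef
      have hy : pass1A r.1 0 (r :: rest) = A1g ++ Yr := by rw [hAy, hYr]
      have hYr_ne : Yr ≠ [] := by rw [hYrdef, hrest0, pass1A_cons]; simp
      have hYrev_ne : Yr.reverse ≠ [] := by simpa [List.reverse_eq_nil_iff] using hYr_ne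
      cases hyr : Yr.reverse with
      | nil => exact absurd hyr hYrev_ne
      | cons rl tl =>
        -- the carried prev_country at the group boundary is s.1
        have hlastC : lastC rl.1 Yr.reverse = s.1 := by
          have : Yr = (s.1, s.2.1, pstep s.1 0 s) :: pass1A s.1 (pstep s.1 0 s) t := by
            rw [hYrdef, hrest0, pass1A_cons]
          rw [this, List.reverse_cons, lastC_append_single]
        obtain ⟨d2, hd2⟩ := pass2A_append Yr.reverse A1g.reverse rl.1 0
        have hgl : (pass2A r.1 0 A1g.reverse).reverse = procGroup (r :: g1) := by
          rw [hA1g]; exact group_lemma _ _ hgc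
        cases har : A1g.reverse with
        | nil => exact absurd har hArev_ne
        | cons z w =>
          have hz : z.1 = r.1 := hA1g_c z (List.mem_reverse.mp (har ▸ List.mem_cons_self ..))
          have hreset : pass2A (lastC rl.1 Yr.reverse) d2 A1g.reverse = pass2A r.1 0 A1g.reverse := by
            rw [hlastC, har, pass2A_reset s.1 d2 z w (hz ▸ (Ne.symm hs)), hz]
          have hAcomp : process_y (r :: rest) = (pass2A rl.1 0 (Yr.reverse ++ A1g.reverse)).reverse := by
            show (match (pass1A r.1 0 (r :: rest)).reverse with
                  | [] => ([] : List (String × String × Int))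
                  | rl :: _ => (pass2A rl.1 0 (pass1A r.1 0 (r :: rest)).reverse).reverse) = _
            rw [hy, List.reverse_append, hyr]
            simp only [List.cons_append]
          have hBside : process_y rest' = (pass2A rl.1 0 Yr.reverse).reverse := by
            rw [hrest0]
            show (match (pass1A s.1 0 (s :: t)).reverse with
                  | [] => ([] : List (String × String × Int))
                  | rl :: _ => (pass2A rl.1 0 (pass1A s.1 0 (s :: t)).reverse).reverse) = _
            rw [show pass1A s.1 0 (s :: t) = Yr by rw [hYrdef, hrest0], hyr]
          have hlen' : rest'.length < n := by
            rw [← hn]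
            calc rest'.length ≤ rest.length := by
                  rw [hrest']; exact List.length_dropWhile_le _ _
              _ < (r :: rest).length := by simp
          have hih : process_y rest' = process_y_alt rest' := ih rest'.length hlen' rest' rfl
          rw [hAcomp, hd2, List.reverse_append, hreset, hgl, haltdef, ← hih, hBside]

-- ===== VERDICT (by name: the statement is the Claim_ definition above) =====
theorem process_y_spec : Claim_equal_process_y := by
  intro cd _ _; exact key_equiv cd
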